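-- pv_equiv track=rewrite | github.com/acherm/agentic-arnoldc | generate_mnm_interpreter.py | estimate_stack_size
-- ===== SOURCE A (Python) =====
-- def estimate_stack_size(instructions):
--     """Conservative estimate of maximum stack depth."""
--     depth = 0
--     max_depth = 0
--     for op, _ in instructions:
--         if op in ('PUSH', 'LOAD', 'DUP', 'READ_INT', 'PUSH_STR', 'READ_STR'):
--             depth += 1
--         elif op in ('POP', 'PRINT', 'STORE', 'EMIT_CHAR'):
--             depth -= 1
--         elif op in ('ADD', 'SUB', 'MUL', 'DIV', 'MOD', 'EQ', 'LT', 'GT',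
--                      'AND', 'OR', 'CONCAT'):
--             depth -= 1   # pop 2, push 1
--         elif op in ('JZ', 'JNZ'):
--             depth -= 1
--         max_depth = max(max_depth, depth)
--     return max(max_depth + 5, 10)
-- ===== SOURCE B (Python) =====
-- # B: backward suffix recurrence m = max(0, delta + m) over the reversed list
-- # (right-fold characterization of the peak), instead of A's forward scan with
-- # a running depth and running max.
-- _STACK_DELTA = {
--     'PUSH': 1, 'LOAD': 1, 'DUP': 1, 'READ_INT': 1, 'PUSH_STR': 1, 'READ_STR': 1,
--     'POP': -1, 'PRINT': -1, 'STORE': -1, 'EMIT_CHAR': -1,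
--     'ADD': -1, 'SUB': -1, 'MUL': -1, 'DIV': -1, 'MOD': -1,
--     'EQ': -1, 'LT': -1, 'GT': -1, 'AND': -1, 'OR': -1, 'CONCAT': -1,
--     'JZ': -1, 'JNZ': -1,
-- }
--
-- def estimate_stack_size(instructions):
--     # m(suffix) = max over prefixes p of suffix (including the empty prefix)
--     # of sum(deltas of p); so after the whole reversed pass m is the peak depth.
--     m = 0
--     for op, _ in reversed(instructions):
--         m = max(0, _STACK_DELTA.get(op, 0) + m)
--     return max(m + 5, 10)
-- ===== Notes on version B (the rewrite author's own statement) =====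
-- stated objective: alternative
-- what changed: Replaces A's forward scan maintaining a running depth and running max by a single backward pass over the reversed list using the suffix recurrence m = max(0, delta + m), the right-fold characterization of the maximum prefix sum; deltas come from one op->delta table instead of the if/elif chain.
import Mathlib
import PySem

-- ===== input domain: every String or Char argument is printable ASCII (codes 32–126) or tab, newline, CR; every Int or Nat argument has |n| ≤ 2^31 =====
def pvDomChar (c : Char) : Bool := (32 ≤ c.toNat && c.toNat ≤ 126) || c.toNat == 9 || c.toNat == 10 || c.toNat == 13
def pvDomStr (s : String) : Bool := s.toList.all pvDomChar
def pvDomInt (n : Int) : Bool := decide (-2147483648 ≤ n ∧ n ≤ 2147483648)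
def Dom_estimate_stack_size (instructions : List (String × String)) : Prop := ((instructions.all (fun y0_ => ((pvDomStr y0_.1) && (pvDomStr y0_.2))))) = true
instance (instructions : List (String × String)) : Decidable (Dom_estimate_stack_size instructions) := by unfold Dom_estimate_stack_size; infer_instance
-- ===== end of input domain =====

-- B replaces A's forward scan (running depth + running max) by one backward pass over the
-- reversed list with the suffix recurrence m = max(0, delta + m) (objective: alternative).

-- ===== PORT A =====
def estimate_stack_size (instructions : List (String × String)) : Int :=
  let st := instructions.foldl (fun (st : Int × Int) ins =>
    let op := ins.1
    let depth :=
      if op ∈ ["PUSH", "LOAD", "DUP", "READ_INT", "PUSH_STR", "READ_STR"] then st.1 + 1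
      else if op ∈ ["POP", "PRINT", "STORE", "EMIT_CHAR"] then st.1 - 1
      else if op ∈ ["ADD", "SUB", "MUL", "DIV", "MOD", "EQ", "LT", "GT", "AND", "OR", "CONCAT"] then st.1 - 1
      else if op ∈ ["JZ", "JNZ"] then st.1 - 1
      else st.1
    (depth, max st.2 depth)) (0, 0)
  max (st.2 + 5) 10

-- ===== PORT B =====
def pvDeltaTable : PySem.Dict String Int :=
  PySem.Dict.ofList [("PUSH", 1), ("LOAD", 1), ("DUP", 1), ("READ_INT", 1), ("PUSH_STR", 1), ("READ_STR", 1),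
    ("POP", -1), ("PRINT", -1), ("STORE", -1), ("EMIT_CHAR", -1),
    ("ADD", -1), ("SUB", -1), ("MUL", -1), ("DIV", -1), ("MOD", -1),
    ("EQ", -1), ("LT", -1), ("GT", -1), ("AND", -1), ("OR", -1), ("CONCAT", -1),
    ("JZ", -1), ("JNZ", -1)]

def estimate_stack_size_alt (instructions : List (String × String)) : Int :=
  let m := instructions.reverse.foldl (fun m p => max 0 (pvDeltaTable.getD p.1 0 + m)) 0
  max (m + 5) 10

-- ===== PRECONDITION & SPEC =====
def Spec_estimate_stack_size (instructions : List (String × String)) (out : Int) : Prop := out = estimate_stack_size_alt instructions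
instance (instructions : List (String × String)) (out : Int) : Decidable (Spec_estimate_stack_size instructions out) := by unfold Spec_estimate_stack_size; infer_instance

-- ===== CLAIM (what is proved, stated in full; the proofs are below) =====
def Claim_equal_estimate_stack_size : Prop := ∀ (instructions : List (String × String)), Dom_estimate_stack_size instructions → Spec_estimate_stack_size instructions (estimate_stack_size instructions)

-- ===== LEMMAS AND PROOFS =====

-- The table lookup computes exactly A's if-chain delta.
set_option maxHeartbeats 2000000 in
theorem pv_table_delta (op : String) :
    pvDeltaTable.getD op 0 =
      (if op ∈ ["PUSH", "LOAD", "DUP", "READ_INT", "PUSH_STR", "READ_STR"] then (1 : Int)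
       else if op ∈ ["POP", "PRINT", "STORE", "EMIT_CHAR"] then -1
       else if op ∈ ["ADD", "SUB", "MUL", "DIV", "MOD", "EQ", "LT", "GT", "AND", "OR", "CONCAT"] then -1
       else if op ∈ ["JZ", "JNZ"] then -1
       else 0) := by
  by_cases h0 : op = "PUSH"; · subst h0; decide
  by_cases h1 : op = "LOAD"; · subst h1; decide
  by_cases h2 : op = "DUP"; · subst h2; decide
  by_cases h3 : op = "READ_INT"; · subst h3; decide
  by_cases h4 : op = "PUSH_STR"; · subst h4; decide
  by_cases h5 : op = "READ_STR"; · subst h5; decide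
  by_cases h6 : op = "POP"; · subst h6; decide
  by_cases h7 : op = "PRINT"; · subst h7; decide
  by_cases h8 : op = "STORE"; · subst h8; decide
  by_cases h9 : op = "EMIT_CHAR"; · subst h9; decide
  by_cases h10 : op = "ADD"; · subst h10; decide
  by_cases h11 : op = "SUB"; · subst h11; decide
  by_cases h12 : op = "MUL"; · subst h12; decide
  by_cases h13 : op = "DIV"; · subst h13; decide
  by_cases h14 : op = "MOD"; · subst h14; decide
  by_cases h15 : op = "EQ"; · subst h15; decide
  by_cases h16 : op = "LT"; · subst h16; decide
  by_cases h17 : op = "GT"; · subst h17; decide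
  by_cases h18 : op = "AND"; · subst h18; decide
  by_cases h19 : op = "OR"; · subst h19; decide
  by_cases h20 : op = "CONCAT"; · subst h20; decide
  by_cases h21 : op = "JZ"; · subst h21; decide
  by_cases h22 : op = "JNZ"; · subst h22; decide
  have g0 : ¬"PUSH" = op := fun e => h0 e.symm
  have g1 : ¬"LOAD" = op := fun e => h1 e.symm
  have g2 : ¬"DUP" = op := fun e => h2 e.symm
  have g3 : ¬"READ_INT" = op := fun e => h3 e.symm
  have g4 : ¬"PUSH_STR" = op := fun e => h4 e.symm
  have g5 : ¬"READ_STR" = op := fun e => h5 e.symm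
  have g6 : ¬"POP" = op := fun e => h6 e.symm
  have g7 : ¬"PRINT" = op := fun e => h7 e.symm
  have g8 : ¬"STORE" = op := fun e => h8 e.symm
  have g9 : ¬"EMIT_CHAR" = op := fun e => h9 e.symm
  have g10 : ¬"ADD" = op := fun e => h10 e.symm
  have g11 : ¬"SUB" = op := fun e => h11 e.symm
  have g12 : ¬"MUL" = op := fun e => h12 e.symm
  have g13 : ¬"DIV" = op := fun e => h13 e.symm
  have g14 : ¬"MOD" = op := fun e => h14 e.symm
  have g15 : ¬"EQ" = op := fun e => h15 e.symm
  have g16 : ¬"LT" = op := fun e => h16 e.symm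
  have g17 : ¬"GT" = op := fun e => h17 e.symm
  have g18 : ¬"AND" = op := fun e => h18 e.symm
  have g19 : ¬"OR" = op := fun e => h19 e.symm
  have g20 : ¬"CONCAT" = op := fun e => h20 e.symm
  have g21 : ¬"JZ" = op := fun e => h21 e.symm
  have g22 : ¬"JNZ" = op := fun e => h22 e.symm
  have hc : pvDeltaTable.contains op = false := by
    rw [show pvDeltaTable = PySem.Dict.mk [("PUSH", 1), ("LOAD", 1), ("DUP", 1), ("READ_INT", 1), ("PUSH_STR", 1), ("READ_STR", 1), ("POP", -1), ("PRINT", -1), ("STORE", -1), ("EMIT_CHAR", -1), ("ADD", -1), ("SUB", -1), ("MUL", -1), ("DIV", -1), ("MOD", -1), ("EQ", -1), ("LT", -1), ("GT", -1), ("AND", -1), ("OR", -1), ("CONCAT", -1), ("JZ", -1), ("JNZ", -1)] from rfl]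
    simp [g0, g1, g2, g3, g4, g5, g6, g7, g8, g9, g10, g11, g12, g13, g14, g15, g16, g17, g18, g19, g20, g21, g22]
  simp only [List.mem_cons, List.not_mem_nil, or_false]
  rw [if_neg (by tauto), if_neg (by tauto), if_neg (by tauto), if_neg (by tauto)]
  exact PySem.Dict.getD_of_not_contains _ _ hc

-- The suffix recurrence is never negative (each step takes max with 0).
theorem pv_foldr_nonneg (l : List (String × String)) :
    (0 : Int) ≤ l.foldr (fun p m => max 0 (pvDeltaTable.getD p.1 0 + m)) 0 := by
  induction l with
  | nil => simp
  | cons p l ih => simp only [List.foldr_cons]; exact le_max_left _ _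

-- Forward scan with running (depth, max) vs the right-fold suffix recurrence.
theorem pv_fwd_eq_bwd (l : List (String × String)) (x mx : Int) (h : x ≤ mx) :
    (l.foldl (fun (s : Int × Int) (p : String × String) =>
        (s.1 + pvDeltaTable.getD p.1 0, max s.2 (s.1 + pvDeltaTable.getD p.1 0))) (x, mx)).2
      = max mx (x + l.foldr (fun p m => max 0 (pvDeltaTable.getD p.1 0 + m)) 0) := by
  induction l generalizing x mx with
  | nil => simp; omega
  | cons p l ih =>
    simp only [List.foldl_cons, List.foldr_cons]
    rw [ih (x + pvDeltaTable.getD p.1 0) (max mx (x + pvDeltaTable.getD p.1 0)) (le_max_right _ _)]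
    have hm := pv_foldr_nonneg l
    generalize pvDeltaTable.getD p.1 0 = d
    generalize l.foldr (fun p m => max 0 (pvDeltaTable.getD p.1 0 + m)) 0 = m at hm ⊢
    simp only [max_def]; split_ifs <;> omega

-- ===== VERDICT (by name: the statement is the Claim_ definition above) =====
theorem estimate_stack_size_spec : Claim_equal_estimate_stack_size := by
  intro instructions _
  unfold Spec_estimate_stack_size estimate_stack_size estimate_stack_size_alt
  dsimp only
  have hstep : (fun (st : Int × Int) (ins : String × String) =>
      let op := ins.1
      let depth :=
        if op ∈ ["PUSH", "LOAD", "DUP", "READ_INT", "PUSH_STR", "READ_STR"] then st.1 + 1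
        else if op ∈ ["POP", "PRINT", "STORE", "EMIT_CHAR"] then st.1 - 1
        else if op ∈ ["ADD", "SUB", "MUL", "DIV", "MOD", "EQ", "LT", "GT", "AND", "OR", "CONCAT"] then st.1 - 1
        else if op ∈ ["JZ", "JNZ"] then st.1 - 1
        else st.1
      (depth, max st.2 depth))
      = (fun (st : Int × Int) (ins : String × String) =>
          (st.1 + pvDeltaTable.getD ins.1 0, max st.2 (st.1 + pvDeltaTable.getD ins.1 0))) := by
    funext st ins
    dsimp only
    rw [pv_table_delta ins.1]
    split_ifs <;> refine Prod.ext ?_ ?_ <;> simp [Int.sub_eq_add_neg]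
  rw [hstep, pv_fwd_eq_bwd instructions 0 0 le_rfl, List.foldl_reverse]
  have hnn := pv_foldr_nonneg instructions
  generalize instructions.foldr (fun p m => max 0 (pvDeltaTable.getD p.1 0 + m)) 0 = m at hnn ⊢
  simp only [max_def]; split_ifs <;> omega
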